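-- pv_equiv track=rewrite | github.com/iamprakhargupta/Big-Data-CSCI-620 | assigment 3 prakhar gupta/q3pruning.py | create_lattice
-- ===== SOURCE A (Python) =====
-- import itertools
--
-- def create_lattice(col):
--     '''
--     Creates a lattice in form of a unidirectional graph
--     :param col: Column names
--     :return: lattice of attributes using itertools
--     '''
--     # col = getcolumns()
--     lattice = {}
--     multicol = itertools.combinations(col, 2)
--     l = []
--     for i in multicol:
--         l.append(i)
--     for i in col:
--         lattice[i] = []
--         for j in l:
--             if i in j:
--                 lattice[i].append(j)
--
--     return lattice
-- ===== SOURCE B (Python) =====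
-- import itertools
--
-- def create_lattice(col):
--     lattice = {c: [] for c in col}
--     for pair in itertools.combinations(col, 2):
--         x, y = pair
--         lattice[x].append(pair)
--         if y != x:
--             lattice[y].append(pair)
--     return lattice
-- ===== Notes on version B (the rewrite author's own statement) =====
-- stated objective: faster
-- what changed: Instead of scanning the full pair list once per column (n x n^2), B initialises every column's bucket once and walks the pair list a single time, appending each pair to both endpoints' buckets.
import Mathlib
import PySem

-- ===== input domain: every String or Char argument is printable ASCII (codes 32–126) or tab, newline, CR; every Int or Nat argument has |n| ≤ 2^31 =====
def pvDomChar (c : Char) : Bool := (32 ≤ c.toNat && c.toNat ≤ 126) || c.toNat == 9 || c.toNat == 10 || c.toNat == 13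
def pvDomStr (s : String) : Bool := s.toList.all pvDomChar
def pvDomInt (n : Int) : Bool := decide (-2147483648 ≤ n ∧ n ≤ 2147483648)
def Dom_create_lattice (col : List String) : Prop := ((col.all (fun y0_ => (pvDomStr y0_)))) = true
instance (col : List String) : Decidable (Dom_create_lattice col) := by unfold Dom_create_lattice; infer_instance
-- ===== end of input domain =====

-- B replaces A's per-column scan of the full pair list by one pass over the pairs that appends
-- each pair to both endpoints' buckets (objective: faster, O(n^2) instead of O(n^3)).

-- itertools.combinations(col, 2), shared transliteration (both Pythons call it)
def pvComb2 : List String → List (String × String)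
  | [] => []
  | x :: xs => xs.map (fun y => (x, y)) ++ pvComb2 xs

-- ===== PORT A =====
def create_lattice (col : List String) : List (String × List (String × String)) :=
  let multicol := pvComb2 col
  let l := multicol.foldl (fun acc i => acc ++ [i]) []
  let lattice := col.foldl (fun d i =>
      l.foldl (fun d j => if i = j.1 ∨ i = j.2 then d.modify i [] (· ++ [j]) else d)
        (d.insert i []))
    PySem.Dict.empty
  lattice.items

-- ===== PORT B =====
def create_lattice_alt (col : List String) : List (String × List (String × String)) :=
  let lattice0 := col.foldl (fun d c => d.insert c ([] : List (String × String))) PySem.Dict.empty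
  let lattice := (pvComb2 col).foldl (fun d pair =>
      let d1 := d.modify pair.1 [] (· ++ [pair])
      if pair.2 ≠ pair.1 then d1.modify pair.2 [] (· ++ [pair]) else d1)
    lattice0
  lattice.items

-- ===== PRECONDITION & SPEC =====
def Spec_create_lattice (col : List String) (out : List (String × List (String × String))) : Prop := out = create_lattice_alt col
instance (col : List String) (out : List (String × List (String × String))) : Decidable (Spec_create_lattice col out) := by unfold Spec_create_lattice; infer_instance

-- ===== CLAIM (what is proved, stated in full; the proofs are below) =====
def Claim_equal_create_lattice : Prop := ∀ (col : List String), Dom_create_lattice col → Spec_create_lattice col (create_lattice col)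

-- ===== LEMMAS AND PROOFS =====

-- both components of every 2-combination come from the input list
theorem pvComb2_mem {col : List String} {j : String × String} (h : j ∈ pvComb2 col) :
    j.1 ∈ col ∧ j.2 ∈ col := by
  induction col with
  | nil => simp [pvComb2] at h
  | cons x xs ih =>
    simp only [pvComb2, List.mem_append, List.mem_map] at h
    rcases h with ⟨y, hy, rfl⟩ | h
    · exact ⟨List.mem_cons_self, List.mem_cons_of_mem _ hy⟩
    · exact ⟨List.mem_cons_of_mem _ (ih h).1, List.mem_cons_of_mem _ (ih h).2⟩

-- A's inner loop over the pair list, started at a dict where i was just (re)bound to v,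
-- is one insert of v ++ the pairs containing i
theorem innerA (l : List (String × String)) (i : String)
    (d : PySem.Dict String (List (String × String))) (v : List (String × String)) :
    l.foldl (fun d j => if i = j.1 ∨ i = j.2 then d.modify i [] (· ++ [j]) else d) (d.insert i v)
      = d.insert i (v ++ l.filter (fun j => decide (i = j.1 ∨ i = j.2))) := by
  induction l generalizing v with
  | nil => simp
  | cons j l ih =>
    simp only [List.foldl_cons, List.filter_cons]
    by_cases h : i = j.1 ∨ i = j.2
    · have hm : (d.insert i v).modify i [] (· ++ [j]) = d.insert i (v ++ [j]) := by
        unfold PySem.Dict.modify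
        simp [PySem.Dict.getD_insert_self, PySem.Dict.insert_insert_self]
      simp [h, hm, ih]
    · simp [h, ih]

-- value of a pure insert loop whose inserted value depends only on the key
theorem getD_insert_loop (col : List String) (g : String → List (String × String))
    (d : PySem.Dict String (List (String × String))) (k : String) :
    (col.foldl (fun d i => d.insert i (g i)) d).getD k []
      = if k ∈ col then g k else d.getD k [] := by
  induction col generalizing d with
  | nil => simp
  | cons i rest ih =>
    simp only [List.foldl_cons, ih, PySem.Dict.getD_insert, List.mem_cons]
    by_cases h1 : k ∈ rest <;> by_cases h2 : k = i <;> simp [h1, h2]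

-- B's pass over the pairs appends to each key exactly the pairs containing it
theorem getD_B (ps : List (String × String))
    (d : PySem.Dict String (List (String × String))) (k : String) :
    (ps.foldl (fun d pair =>
        let d1 := d.modify pair.1 [] (· ++ [pair])
        if pair.2 ≠ pair.1 then d1.modify pair.2 [] (· ++ [pair]) else d1) d).getD k []
      = d.getD k [] ++ ps.filter (fun j => decide (k = j.1 ∨ k = j.2)) := by
  induction ps generalizing d with
  | nil => simp
  | cons j ps ih =>
    simp only [List.foldl_cons, List.filter_cons, ih]
    by_cases hne : j.2 ≠ j.1
    · simp only [hne, if_true, ne_eq, not_false_iff]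
      rw [PySem.Dict.getD_modify, PySem.Dict.getD_modify]
      by_cases h1 : k = j.1 <;> by_cases h2 : k = j.2 <;>
        simp_all [PySem.Dict.getD_modify]
    · push Not at hne
      simp only [hne, ne_eq, not_true_eq_false, if_false]
      rw [PySem.Dict.getD_modify]
      by_cases h1 : k = j.1 <;> simp_all

-- B's pass over the pairs does not change the key list when every endpoint is already a key
theorem keys_B (ps : List (String × String))
    (d : PySem.Dict String (List (String × String)))
    (h : ∀ j ∈ ps, j.1 ∈ d.keys ∧ j.2 ∈ d.keys) :
    (ps.foldl (fun d pair =>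
        let d1 := d.modify pair.1 [] (· ++ [pair])
        if pair.2 ≠ pair.1 then d1.modify pair.2 [] (· ++ [pair]) else d1) d).keys
      = d.keys := by
  induction ps generalizing d with
  | nil => rfl
  | cons j ps ih =>
    have hj := h j List.mem_cons_self
    have hk1 : (d.modify j.1 [] (· ++ [j])).keys = d.keys := by
      rw [PySem.Dict.keys_modify,
        PySem.Dict.keys_insert_of_contains _ _ ((PySem.Dict.contains_iff_mem_keys d j.1).2 hj.1)]
    have hstep : ((if j.2 ≠ j.1 then (d.modify j.1 [] (· ++ [j])).modify j.2 [] (· ++ [j])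
        else d.modify j.1 [] (· ++ [j]))).keys = d.keys := by
      by_cases hne : j.2 ≠ j.1
      · rw [if_pos hne]
        rw [PySem.Dict.keys_modify,
          PySem.Dict.keys_insert_of_contains _ _ ?_, hk1]
        rw [PySem.Dict.contains_iff_mem_keys, hk1]
        exact hj.2
      · simpa [hne] using hk1
    simp only [List.foldl_cons]
    rw [ih _ ?_]
    · exact hstep
    · intro p hp
      rw [hstep]
      exact h p (List.mem_cons_of_mem _ hp)

-- ===== VERDICT (by name: the statement is the Claim_ definition above) =====
theorem create_lattice_spec : Claim_equal_create_lattice := by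
  intro col _
  show create_lattice col = create_lattice_alt col
  unfold create_lattice create_lattice_alt
  simp only [PySem.List.foldl_append_singleton_eq_self, List.nil_append]
  -- rewrite A's outer loop into a pure insert loop
  have hA : (List.foldl (fun d i =>
      (pvComb2 col).foldl (fun d j => if i = j.1 ∨ i = j.2 then d.modify i [] (· ++ [j]) else d)
        (d.insert i [])) PySem.Dict.empty col)
      = List.foldl (fun d i =>
          d.insert i ((pvComb2 col).filter (fun j => decide (i = j.1 ∨ i = j.2))))
        PySem.Dict.empty col := by
    have hfun : (fun (d : PySem.Dict String (List (String × String))) (i : String) =>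
        (pvComb2 col).foldl (fun d j => if i = j.1 ∨ i = j.2 then d.modify i [] (· ++ [j]) else d)
          (d.insert i []))
        = (fun d i => d.insert i ((pvComb2 col).filter (fun j => decide (i = j.1 ∨ i = j.2)))) := by
      funext d i
      simpa using innerA (pvComb2 col) i d []
    rw [hfun]
  rw [hA]
  set dA := List.foldl (fun d i =>
      d.insert i ((pvComb2 col).filter (fun j => decide (i = j.1 ∨ i = j.2))))
    PySem.Dict.empty col with hdA
  set d0 := List.foldl (fun d c => d.insert c ([] : List (String × String))) PySem.Dict.empty col with hd0
  set dB := (pvComb2 col).foldl (fun d pair =>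
      let d1 := d.modify pair.1 [] (· ++ [pair])
      if pair.2 ≠ pair.1 then d1.modify pair.2 [] (· ++ [pair]) else d1) d0 with hdB
  -- the key lists
  have hkA : dA.keys = PySem.Set.update [] col := by
    rw [hdA, PySem.Dict.keys_foldl_insert _ (fun _ i => (pvComb2 col).filter _), PySem.Dict.keys_empty]
  have hk0 : d0.keys = PySem.Set.update [] col := by
    rw [hd0, PySem.Dict.keys_foldl_insert _ (fun _ _ => ([] : List (String × String))), PySem.Dict.keys_empty]
  have hmem0 : ∀ j ∈ pvComb2 col, j.1 ∈ d0.keys ∧ j.2 ∈ d0.keys := by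
    intro j hj
    have := pvComb2_mem hj
    rw [hk0, PySem.Set.update_nil_left]
    exact ⟨(PySem.Set.mem_ofList col j.1).2 this.1, (PySem.Set.mem_ofList col j.2).2 this.2⟩
  have hkB : dB.keys = PySem.Set.update [] col := by
    rw [hdB, keys_B _ _ hmem0, hk0]
  have hnodA : dA.keys.Nodup := by
    rw [hdA]; exact PySem.Dict.nodup_keys_foldl_insert _ _ _ (by simp [PySem.Dict.keys_empty])
  have hnodB : dB.keys.Nodup := by rw [hkB, ← hkA]; exact hnodA
  -- the values at every actual key agree
  have hval : ∀ k ∈ col, dA.getD k [] = dB.getD k [] := by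
    intro k hk
    rw [hdA, hdB, getD_insert_loop, getD_B, hd0, getD_insert_loop]
    simp [hk]
  -- conclude on the items lists
  rw [PySem.Dict.items_eq_map_keys dA hnodA [], PySem.Dict.items_eq_map_keys dB hnodB [],
    hkA, hkB]
  apply List.map_congr_left
  intro k hk
  have hkcol : k ∈ col := by
    rw [PySem.Set.update_nil_left] at hk
    exact (PySem.Set.mem_ofList col k).1 hk
  rw [hval k hkcol]
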